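-- pv_equiv track=rewrite | github.com/licong01-cloud/RD-Agent | tools/backfill_production_bundle_manifests.py | _pick_best_config_name
-- ===== SOURCE A (Python) =====
-- def _pick_best_config_name(candidates: list[str]) -> str | None:
--     if not candidates:
--         return None
--     prefer = [
--         "conf_baseline.yaml",
--         "conf.yaml",
--         "config.yaml",
--         "config.yml",
--         "conf_baseline.yml",
--         "conf.yml",
--     ]
--     lower_map = {c.lower(): c for c in candidates}
--     for p in prefer:
--         if p.lower() in lower_map:
--             return lower_map[p.lower()]
--     return sorted(candidates)[0]
-- ===== SOURCE B (Python) =====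
-- def _pick_best_config_name(candidates: list[str]) -> str | None:
--     if not candidates:
--         return None
--     prefer_rank = {
--         "conf_baseline.yaml": 0,
--         "conf.yaml": 1,
--         "config.yaml": 2,
--         "config.yml": 3,
--         "conf_baseline.yml": 4,
--         "conf.yml": 5,
--     }
--     best = None  # (rank, name); later candidates win ties, lower rank wins
--     for c in candidates:
--         r = prefer_rank.get(c.lower())
--         if r is not None and (best is None or r <= best[0]):
--             best = (r, c)
--     if best is not None:
--         return best[1]
--     return min(candidates)
-- ===== Notes on version B (the rewrite author's own statement) =====
-- stated objective: alternative
-- what changed: Replaces A's build-a-lowercase-dict-then-scan-the-preference-list decomposition with a single pass over the candidates that tracks the best (rank, name) so far via a precomputed rank table (later candidates overwrite equal ranks, matching the dict's last-wins behaviour), and uses min() instead of a full sort for the fallback.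
import Mathlib
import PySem

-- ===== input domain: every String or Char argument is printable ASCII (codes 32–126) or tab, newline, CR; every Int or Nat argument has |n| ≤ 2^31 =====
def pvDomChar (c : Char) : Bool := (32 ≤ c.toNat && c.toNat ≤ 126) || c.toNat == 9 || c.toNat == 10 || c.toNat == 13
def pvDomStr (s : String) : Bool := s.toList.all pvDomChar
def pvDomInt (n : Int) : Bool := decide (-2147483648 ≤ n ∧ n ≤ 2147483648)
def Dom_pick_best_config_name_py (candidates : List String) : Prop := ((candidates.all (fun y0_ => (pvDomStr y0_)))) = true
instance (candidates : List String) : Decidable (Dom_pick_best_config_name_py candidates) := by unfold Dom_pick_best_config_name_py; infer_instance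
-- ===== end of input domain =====

-- B replaces A's build-a-lowercase-dict-then-scan-the-preference-list decomposition by a single
-- pass over the candidates tracking the best (rank, name) so far, with min() instead of sorting
-- for the fallback (objective: alternative decomposition).

-- ===== PORT A =====
def pvPreferA : List String :=
  ["conf_baseline.yaml", "conf.yaml", "config.yaml", "config.yml", "conf_baseline.yml", "conf.yml"]

-- the 'for p in prefer: if p.lower() in lower_map: return lower_map[p.lower()]' loop
def pvLoopA (d : PySem.Dict String String) : List String → Option String
  | [] => none
  | p :: ps =>
      match d.get? (PySem.Str.lower p) with
      | some v => some v
      | none => pvLoopA d ps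

def pick_best_config_name_py (candidates : List String) : Option String :=
  if candidates = [] then none
  else
    let lower_map := candidates.foldl (fun d c => d.insert (PySem.Str.lower c) c) PySem.Dict.empty
    match pvLoopA lower_map pvPreferA with
    | some v => some v
    | none => PySem.List.pyGet? (PySem.List.sorted candidates (fun x => x) false) 0

-- ===== PORT B =====
def pvRankDictB : PySem.Dict String Int :=
  PySem.Dict.mk [("conf_baseline.yaml", 0), ("conf.yaml", 1), ("config.yaml", 2),
                 ("config.yml", 3), ("conf_baseline.yml", 4), ("conf.yml", 5)]

-- one loop step: keep the best (rank, name); later candidates win ties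
def pvStepB (best : Option (Int × String)) (c : String) : Option (Int × String) :=
  match pvRankDictB.get? (PySem.Str.lower c) with
  | none => best
  | some r =>
      match best with
      | none => some (r, c)
      | some (r0, _) => if r ≤ r0 then some (r, c) else best

def pick_best_config_name_py_alt (candidates : List String) : Option String :=
  if candidates = [] then none
  else
    match candidates.foldl pvStepB none with
    | some (_, c) => some c
    | none => PySem.List.min? candidates (fun x => x)

-- ===== PRECONDITION & SPEC =====
def Spec_pick_best_config_name_py (candidates : List String) (out : Option String) : Prop := out = pick_best_config_name_py_alt candidates
instance (candidates : List String) (out : Option String) : Decidable (Spec_pick_best_config_name_py candidates out) := by unfold Spec_pick_best_config_name_py; infer_instance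

-- ===== CLAIM (what is proved, stated in full; the proofs are below) =====
def Claim_equal_pick_best_config_name_py : Prop := ∀ (candidates : List String), Dom_pick_best_config_name_py candidates → Spec_pick_best_config_name_py candidates (pick_best_config_name_py candidates)

-- ===== LEMMAS AND PROOFS =====

-- merge of two "best (rank, name)" summaries; the right argument stands for LATER candidates
def pvCombine (a b : Option (Int × String)) : Option (Int × String) :=
  match b with
  | none => a
  | some (r, c) =>
      match a with
      | none => some (r, c)
      | some (r0, _) => if r ≤ r0 then some (r, c) else a

-- position of s in ps, counting from i
def pvPosFind (i : Int) : List String → String → Option Int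
  | [], _ => none
  | p :: ps, s => if p == s then some i else pvPosFind (i + 1) ps s

-- A's preference scan, instrumented with the index of the hit
def pvFindIdx (d : PySem.Dict String String) (i : Int) : List String → Option (Int × String)
  | [] => none
  | p :: ps =>
      match d.get? p with
      | some v => some (i, v)
      | none => pvFindIdx d (i + 1) ps

def pvSingle (c : String) : Option (Int × String) :=
  (pvPosFind 0 pvPreferA (PySem.Str.lower c)).map (fun r => (r, c))

-- right-to-left "best summary" of a candidate list
def pvSpecR : List String → Option (Int × String)
  | [] => none
  | c :: t => pvCombine (pvSingle c) (pvSpecR t)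

theorem pvCombine_none_left (b : Option (Int × String)) : pvCombine none b = b := by
  rcases b with _ | ⟨r, c⟩ <;> rfl

theorem pvCombine_assoc (a b c : Option (Int × String)) :
    pvCombine (pvCombine a b) c = pvCombine a (pvCombine b c) := by
  rcases a with _ | ⟨ra, ca⟩ <;> rcases b with _ | ⟨rb, cb⟩ <;> rcases c with _ | ⟨rc, cc⟩ <;>
    simp only [pvCombine] <;> split_ifs <;> (try (dsimp only; split_ifs)) <;>
      first | rfl | omega

theorem pvPosFind_ge (ps : List String) : ∀ (i j : Int) (s : String),
    pvPosFind i ps s = some j → i ≤ j := by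
  induction ps with
  | nil => intro i j s h; simp [pvPosFind] at h
  | cons p ps ih =>
      intro i j s h
      by_cases hp : (p == s) = true
      · simp [pvPosFind, hp] at h; omega
      · simp [pvPosFind, hp] at h
        have := ih (i + 1) j s h
        omega

theorem pvFindIdx_ge (ps : List String) : ∀ (d : PySem.Dict String String) (i j : Int) (v : String),
    pvFindIdx d i ps = some (j, v) → i ≤ j := by
  induction ps with
  | nil => intro d i j v h; simp [pvFindIdx] at h
  | cons p ps ih =>
      intro d i j v h
      cases hd : d.get? p with
      | some w => simp [pvFindIdx, hd] at h; omega
      | none =>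
          simp [pvFindIdx, hd] at h
          have := ih d (i + 1) j v h
          omega

theorem pvFindIdx_insert (ps : List String) : ∀ (i : Int) (d : PySem.Dict String String) (k v : String),
    pvFindIdx (d.insert k v) i ps
      = pvCombine (pvFindIdx d i ps) ((pvPosFind i ps k).map (fun j => (j, v))) := by
  induction ps with
  | nil => intro i d k v; rfl
  | cons p ps ih =>
      intro i d k v
      by_cases hpk : p = k
      · subst hpk
        have h1 : (d.insert p v).get? p = some v := PySem.Dict.get?_insert_self d p v
        cases hd : d.get? p with
        | some w =>
            simp [pvFindIdx, pvPosFind, h1, hd, pvCombine]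
        | none =>
            cases ha : pvFindIdx d (i + 1) ps with
            | none => simp [pvFindIdx, pvPosFind, h1, hd, ha, pvCombine]
            | some jw =>
                rcases jw with ⟨j, w⟩
                have hij : i + 1 ≤ j := pvFindIdx_ge ps d (i + 1) j w ha
                simp [pvFindIdx, pvPosFind, h1, hd, ha, pvCombine]
                omega
      · have h1 : (d.insert k v).get? p = d.get? p :=
          PySem.Dict.get?_insert_of_ne d v hpk
        have hbk : (p == k) = false := by simp [hpk]
        cases hd : d.get? p with
        | some w =>
            cases hpos : pvPosFind (i + 1) ps k with
            | none => simp [pvFindIdx, pvPosFind, h1, hd, hbk, hpos, pvCombine]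
            | some j =>
                have hij : i + 1 ≤ j := pvPosFind_ge ps (i + 1) j k hpos
                simp [pvFindIdx, pvPosFind, h1, hd, hbk, hpos, pvCombine]
                omega
        | none =>
            simp [pvFindIdx, pvPosFind, h1, hd, hbk]
            exact ih (i + 1) d k v

theorem pvFoldlInsert (xs : List String) : ∀ (d : PySem.Dict String String),
    pvFindIdx (xs.foldl (fun d c => d.insert (PySem.Str.lower c) c) d) 0 pvPreferA
      = pvCombine (pvFindIdx d 0 pvPreferA) (pvSpecR xs) := by
  induction xs with
  | nil => intro d; rfl
  | cons c t ih =>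
      intro d
      have : pvFindIdx (d.insert (PySem.Str.lower c) c) 0 pvPreferA
          = pvCombine (pvFindIdx d 0 pvPreferA) (pvSingle c) := by
        rw [pvFindIdx_insert]; rfl
      calc pvFindIdx ((c :: t).foldl (fun d c => d.insert (PySem.Str.lower c) c) d) 0 pvPreferA
          = pvCombine (pvFindIdx (d.insert (PySem.Str.lower c) c) 0 pvPreferA) (pvSpecR t) := ih _
        _ = pvCombine (pvCombine (pvFindIdx d 0 pvPreferA) (pvSingle c)) (pvSpecR t) := by rw [this]
        _ = pvCombine (pvFindIdx d 0 pvPreferA) (pvCombine (pvSingle c) (pvSpecR t)) := pvCombine_assoc _ _ _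
        _ = pvCombine (pvFindIdx d 0 pvPreferA) (pvSpecR (c :: t)) := rfl

theorem pvFindIdx_empty : pvFindIdx PySem.Dict.empty 0 pvPreferA = none := by decide

theorem pvLoopA_eq (ps : List String) : ∀ (d : PySem.Dict String String) (i : Int),
    pvLoopA d ps = (pvFindIdx d i (ps.map PySem.Str.lower)).map Prod.snd := by
  induction ps with
  | nil => intro d i; rfl
  | cons p ps ih =>
      intro d i
      cases hd : d.get? (PySem.Str.lower p) with
      | some v => simp [pvLoopA, pvFindIdx, hd]
      | none => simp [pvLoopA, pvFindIdx, hd]; exact ih d (i + 1)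

theorem map_lower_prefer : pvPreferA.map PySem.Str.lower = pvPreferA := by decide

theorem rank_eq_posFind (s : String) :
    pvRankDictB.get? s = pvPosFind 0 pvPreferA s := by
  simp only [pvRankDictB, pvPreferA, pvPosFind, PySem.Dict.get?_mk_cons]
  norm_num
  split_ifs <;> simp [PySem.Dict.get?]

theorem pvStepB_eq (acc : Option (Int × String)) (c : String) :
    pvStepB acc c = pvCombine acc (pvSingle c) := by
  cases h : pvPosFind 0 pvPreferA (PySem.Str.lower c) with
  | none => rcases acc with _ | ⟨r0, c0⟩ <;> simp [pvStepB, pvCombine, pvSingle, rank_eq_posFind, h]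
  | some r => rcases acc with _ | ⟨r0, c0⟩ <;> simp [pvStepB, pvCombine, pvSingle, rank_eq_posFind, h]

theorem pvFoldlB (xs : List String) : ∀ (acc : Option (Int × String)),
    xs.foldl pvStepB acc = pvCombine acc (pvSpecR xs) := by
  induction xs with
  | nil => intro acc; rfl
  | cons c t ih =>
      intro acc
      calc (c :: t).foldl pvStepB acc = t.foldl pvStepB (pvStepB acc c) := rfl
        _ = pvCombine (pvStepB acc c) (pvSpecR t) := ih _
        _ = pvCombine (pvCombine acc (pvSingle c)) (pvSpecR t) := by rw [pvStepB_eq]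
        _ = pvCombine acc (pvCombine (pvSingle c) (pvSpecR t)) := pvCombine_assoc _ _ _
        _ = pvCombine acc (pvSpecR (c :: t)) := rfl

theorem sorted_head_eq_min (candidates : List String) (h : candidates ≠ []) :
    PySem.List.pyGet? (PySem.List.sorted candidates (fun x => x) false) 0
      = PySem.List.min? candidates (fun x => x) := by
  cases hs : PySem.List.sorted candidates (fun x => x) false with
  | nil => exact absurd ((PySem.List.sorted_eq_nil_iff _ _ _).mp hs) h
  | cons m t =>
      cases hm : PySem.List.min? candidates (fun x => x) with
      | none => exact absurd ((PySem.List.min?_eq_none_iff _ _).mp hm) h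
      | some m' =>
          have hmem : m ∈ candidates := by
            have : m ∈ PySem.List.sorted candidates (fun x => x) false := by simp [hs]
            exact (PySem.List.mem_sorted _ _ _ _).mp this
          have hmem' : m' ∈ candidates := PySem.List.min?_mem hm
          have h1 : m ≤ m' := PySem.List.key_head_sorted_le _ _ hs m' hmem'
          have h2 : m' ≤ m := PySem.List.min?_isMin hm m hmem
          have : m = m' := le_antisymm h1 h2
          subst this
          simp [PySem.List.pyGet?, PySem.List.pyIdx?]

-- ===== VERDICT (by name: the statement is the Claim_ definition above) =====
theorem pick_best_config_name_py_spec : Claim_equal_pick_best_config_name_py := by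
  intro candidates _
  unfold Spec_pick_best_config_name_py pick_best_config_name_py pick_best_config_name_py_alt
  by_cases hc : candidates = []
  · simp [hc]
  · simp only [hc, if_false]
    have hA : pvLoopA (candidates.foldl (fun d c => d.insert (PySem.Str.lower c) c) PySem.Dict.empty) pvPreferA
        = (pvSpecR candidates).map Prod.snd := by
      rw [pvLoopA_eq pvPreferA _ 0, map_lower_prefer, pvFoldlInsert, pvFindIdx_empty,
        pvCombine_none_left]
    have hB : candidates.foldl pvStepB none = pvSpecR candidates := by
      rw [pvFoldlB, pvCombine_none_left]
    rw [hA, hB]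
    cases hsp : pvSpecR candidates with
    | none => simpa using sorted_head_eq_min candidates hc
    | some rc => rcases rc with ⟨r, c⟩; rfl
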